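-- pv_equiv track=rewrite | github.com/caue-paiva/prog_funcional | python/trabalho4.py | string_jogada_aux
-- ===== SOURCE A (Python) =====
-- def string_jogada_aux(
--       list_jogadas:list[int],
--       index:int,
--       arremeso_ante_rodada:int,
--       string_retorno:str,
--       rodada_atual:int
--    )->str:
--    if index >= len(list_jogadas):
--       return string_retorno
--
--    pinos_derrubados: int = list_jogadas[index]
--
--    if rodada_atual < 10 :
--       if arremeso_ante_rodada == -1: #primeira jogada
--          if pinos_derrubados == 10:
--             nova_string = string_retorno + "X _ | "
--             novo_arremeso_ante = -1 #vamos para uma nova rodada depois do strike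
--             prox_rodada = rodada_atual + 1
--          else:
--             novo_arremeso_ante = pinos_derrubados
--             nova_string = string_retorno + f"{pinos_derrubados} "
--             prox_rodada = rodada_atual
--       else: #segunda jogada
--          novo_arremeso_ante = -1
--          if arremeso_ante_rodada + pinos_derrubados == 10: #spare
--             nova_string = string_retorno + "/ | "
--          else:
--             nova_string = string_retorno + f"{pinos_derrubados} | "
--          prox_rodada = rodada_atual + 1
--    else:
--
--       if pinos_derrubados == 10:
--          nova_string = string_retorno + "X "
--       else:
--          nova_string = string_retorno + f"{pinos_derrubados}"
--
--       novo_arremeso_ante = pinos_derrubados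
--       prox_rodada = rodada_atual
--
--    return string_jogada_aux(list_jogadas,index+1,novo_arremeso_ante,nova_string,prox_rodada)
-- ===== SOURCE B (Python) =====
-- def string_jogada_aux(
--       list_jogadas: list[int],
--       index: int,
--       arremeso_ante_rodada: int,
--       string_retorno: str,
--       rodada_atual: int
--    ) -> str:
--    parts = [string_retorno]
--    prev = arremeso_ante_rodada
--    frame = rodada_atual
--    for i in range(index, len(list_jogadas)):
--       pins = list_jogadas[i]
--       if frame >= 10:
--          # past the 10th frame: bare symbols, frame never advances
--          parts.append("X " if pins == 10 else f"{pins}")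
--          prev = pins
--       elif prev == -1:
--          # first throw of a frame
--          if pins == 10:
--             parts.append("X _ | ")
--             frame += 1
--          else:
--             parts.append(f"{pins} ")
--             prev = pins
--       else:
--          # second throw of a frame
--          parts.append("/ | " if prev + pins == 10 else f"{pins} | ")
--          prev = -1
--          frame += 1
--    return "".join(parts)
-- ===== Notes on version B (the rewrite author's own statement) =====
-- stated objective: idiomatic
-- what changed: Replaced A's tail recursion carrying an accumulator string with an explicit for-loop over indices plus a list of fragments joined once at the end, with the final-frame case hoisted first and the strike/spare cases flattened.
import Mathlib
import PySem

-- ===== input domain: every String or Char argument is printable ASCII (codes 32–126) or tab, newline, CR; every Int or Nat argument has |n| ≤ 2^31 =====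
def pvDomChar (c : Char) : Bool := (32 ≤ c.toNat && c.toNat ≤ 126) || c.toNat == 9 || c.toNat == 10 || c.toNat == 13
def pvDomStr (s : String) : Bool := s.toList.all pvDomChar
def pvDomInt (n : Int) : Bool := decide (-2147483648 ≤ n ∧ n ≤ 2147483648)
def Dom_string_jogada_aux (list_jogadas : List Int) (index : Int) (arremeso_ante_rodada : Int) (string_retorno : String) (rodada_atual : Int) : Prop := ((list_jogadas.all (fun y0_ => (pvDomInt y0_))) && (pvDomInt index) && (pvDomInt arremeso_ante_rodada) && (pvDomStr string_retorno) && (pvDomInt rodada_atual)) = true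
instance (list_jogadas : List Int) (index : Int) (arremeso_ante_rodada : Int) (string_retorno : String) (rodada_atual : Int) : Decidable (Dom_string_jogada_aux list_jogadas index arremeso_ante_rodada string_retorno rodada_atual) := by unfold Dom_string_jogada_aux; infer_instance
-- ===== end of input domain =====

-- B rewrites A's tail recursion as a for-loop collecting fragments joined once (idiomatic; return value only).

-- ===== PORT A =====
-- literal transliteration of A's tail recursion; list_jogadas[index] is PySem.List.pyGet?
-- (Python raises IndexError where it is none; Pre_ excludes exactly those inputs, so the
-- .getD 0 default is never reached under Pre_).
def string_jogada_aux (list_jogadas : List Int) (index : Int) (arremeso_ante_rodada : Int) (string_retorno : String) (rodada_atual : Int) : String :=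
  if _h : index ≥ (list_jogadas.length : Int) then string_retorno
  else
    let pinos_derrubados : Int := (PySem.List.pyGet? list_jogadas index).getD 0
    let t : String × Int × Int :=
      if rodada_atual < 10 then
        if arremeso_ante_rodada = -1 then
          if pinos_derrubados = 10 then
            (string_retorno ++ "X _ | ", -1, rodada_atual + 1)
          else
            (string_retorno ++ PySem.Int.toStr pinos_derrubados ++ " ", pinos_derrubados, rodada_atual)
        else
          if arremeso_ante_rodada + pinos_derrubados = 10 then
            (string_retorno ++ "/ | ", -1, rodada_atual + 1)
          else
            (string_retorno ++ PySem.Int.toStr pinos_derrubados ++ " | ", -1, rodada_atual + 1)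
      else
        (if pinos_derrubados = 10 then string_retorno ++ "X "
         else string_retorno ++ PySem.Int.toStr pinos_derrubados, pinos_derrubados, rodada_atual)
    string_jogada_aux list_jogadas (index + 1) t.2.1 t.1 t.2.2
termination_by ((list_jogadas.length : Int) - index).toNat
decreasing_by omega

-- ===== PORT B =====
-- one loop step of Source B: state = (fragments so far, prev throw, current frame)
def sjaStep (list_jogadas : List Int) (st : List String × Int × Int) (i : Int) : List String × Int × Int :=
  let pins : Int := (PySem.List.pyGet? list_jogadas i).getD 0
  match st with
  | (parts, prev, frame) =>
    if frame ≥ 10 then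
      (parts ++ [if pins = 10 then "X " else PySem.Int.toStr pins], pins, frame)
    else if prev = -1 then
      if pins = 10 then (parts ++ ["X _ | "], prev, frame + 1)
      else (parts ++ [PySem.Int.toStr pins ++ " "], pins, frame)
    else
      (parts ++ [if prev + pins = 10 then "/ | " else PySem.Int.toStr pins ++ " | "], -1, frame + 1)

def string_jogada_aux_alt (list_jogadas : List Int) (index : Int) (arremeso_ante_rodada : Int) (string_retorno : String) (rodada_atual : Int) : String :=
  let fin := (PySem.List.pyRange index (list_jogadas.length : Int) 1).foldl
      (sjaStep list_jogadas) ([string_retorno], arremeso_ante_rodada, rodada_atual)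
  String.join fin.1

-- ===== PRECONDITION & SPEC =====
-- Pre_ excludes exactly the inputs where Python A raises IndexError: index more negative
-- than -len(list_jogadas) while index < len(list_jogadas) (B raises there too).
def Pre_string_jogada_aux (list_jogadas : List Int) (index : Int) (arremeso_ante_rodada : Int) (string_retorno : String) (rodada_atual : Int) : Prop :=
  -(list_jogadas.length : Int) ≤ index
instance (list_jogadas : List Int) (index : Int) (arremeso_ante_rodada : Int) (string_retorno : String) (rodada_atual : Int) : Decidable (Pre_string_jogada_aux list_jogadas index arremeso_ante_rodada string_retorno rodada_atual) := by unfold Pre_string_jogada_aux; infer_instance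
def pvWitness_string_jogada_aux : List Int × Int × Int × String × Int := ([10, 3, 7, 4, 5], 0, -1, "", 1)

def Spec_string_jogada_aux (list_jogadas : List Int) (index : Int) (arremeso_ante_rodada : Int) (string_retorno : String) (rodada_atual : Int) (out : String) : Prop := out = string_jogada_aux_alt list_jogadas index arremeso_ante_rodada string_retorno rodada_atual
instance (list_jogadas : List Int) (index : Int) (arremeso_ante_rodada : Int) (string_retorno : String) (rodada_atual : Int) (out : String) : Decidable (Spec_string_jogada_aux list_jogadas index arremeso_ante_rodada string_retorno rodada_atual out) := by unfold Spec_string_jogada_aux; infer_instance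

-- ===== CLAIM =====
def Claim_equal_string_jogada_aux : Prop := ∀ (list_jogadas : List Int) (index : Int) (arremeso_ante_rodada : Int) (string_retorno : String) (rodada_atual : Int), Dom_string_jogada_aux list_jogadas index arremeso_ante_rodada string_retorno rodada_atual → Pre_string_jogada_aux list_jogadas index arremeso_ante_rodada string_retorno rodada_atual → Spec_string_jogada_aux list_jogadas index arremeso_ante_rodada string_retorno rodada_atual (string_jogada_aux list_jogadas index arremeso_ante_rodada string_retorno rodada_atual)

-- ===== LEMMAS AND PROOFS =====

theorem join_snoc (s : List String) (x : String) : String.join (s ++ [x]) = String.join s ++ x := by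
  simp [String.join, List.foldl_append]

theorem sja_main (l : List Int) : ∀ (n : Nat) (index arr : Int) (s : List String) (rod : Int),
    ((l.length : Int) - index).toNat = n →
    string_jogada_aux l index arr (String.join s) rod =
      String.join ((PySem.List.pyRange index (l.length : Int) 1).foldl (sjaStep l) (s, arr, rod)).1 := by
  intro n
  induction n with
  | zero =>
    intro index arr s rod h
    have hge : (l.length : Int) ≤ index := by omega
    rw [string_jogada_aux, PySem.List.pyRange_one_eq_nil hge]
    simp [show index ≥ (l.length : Int) from hge]
  | succ k ih =>
    intro index arr s rod h
    have hlt : index < (l.length : Int) := by omega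
    have hk : ((l.length : Int) - (index + 1)).toNat = k := by omega
    rw [string_jogada_aux, PySem.List.pyRange_one_cons hlt]
    rw [dif_neg (by omega : ¬ index ≥ (l.length : Int))]
    simp only [List.foldl_cons, sjaStep]
    split_ifs with h10 harr hpin hsp hpin' <;>
      simp_all only [not_lt, ge_iff_le] <;>
      first
      | (rw [← join_snoc]; exact ih (index + 1) _ _ _ hk)
      | (rw [String.append_assoc, ← join_snoc]; exact ih (index + 1) _ _ _ hk)
      | (exfalso; omega)

theorem string_jogada_aux_spec : Claim_equal_string_jogada_aux := by
  intro l index arr s rod _ _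
  unfold Spec_string_jogada_aux string_jogada_aux_alt
  have h := sja_main l ((l.length : Int) - index).toNat index arr [s] rod rfl
  simpa [String.join] using h
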